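-- pv_equiv track=rewrite | github.com/PNosikov/sphere-python | Homework3/dz3n5.py | chain_loop
-- ===== SOURCE A (Python) =====
-- def chain_loop(args):
--     check = {}
--     list1 = args
--     list1 = list(filter(lambda x: bool(x), args))
--     list1 = list(map(iter, list1))
--     for i in range(len(list1)):
--         check[i] = 0
--     j = 0
--     k = 0
--     while (j >= 0):
--         try:
--             for i in range(k, len(list1)):
--                 if check[i] == 0:
--                     yield next(list1[i])
--             k = 0
--         except (StopIteration):
--             k = i + 1
--             check[i] = 1
--             continue
--         flag = 1
--         for i in range(len(list1)):
--             if (check[i] == 0):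
--                 flag = 0
--         if (flag == 1):
--             j = -1
-- ===== SOURCE B (Python) =====
-- def chain_loop(args):
--     live = [iter(x) for x in args if x]
--     while live:
--         survivors = []
--         for it in live:
--             try:
--                 v = next(it)
--             except StopIteration:
--                 continue
--             yield v
--             survivors.append(it)
--         live = survivors
-- ===== Notes on version B (the rewrite author's own statement) =====
-- stated objective: simpler
-- what changed: Replaces A's flag-dict plus resume-cursor bookkeeping (check/k, flag rescan, StopIteration restart) with a list of live iterators that is rebuilt each round-robin pass, keeping only the survivors.
import Mathlib
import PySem

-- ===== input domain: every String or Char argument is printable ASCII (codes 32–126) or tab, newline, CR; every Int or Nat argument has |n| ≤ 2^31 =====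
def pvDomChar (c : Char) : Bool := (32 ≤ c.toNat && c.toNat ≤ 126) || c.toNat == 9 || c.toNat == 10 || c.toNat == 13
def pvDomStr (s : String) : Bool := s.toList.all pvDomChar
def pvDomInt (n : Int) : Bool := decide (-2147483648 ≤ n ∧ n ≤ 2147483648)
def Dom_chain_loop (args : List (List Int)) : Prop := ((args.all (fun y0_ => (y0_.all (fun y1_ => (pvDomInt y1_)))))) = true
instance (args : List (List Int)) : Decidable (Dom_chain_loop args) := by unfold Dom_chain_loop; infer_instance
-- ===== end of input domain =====

-- B replaces A's check-flag dict and resume cursor k with a rebuilt list of live iterators per pass (objective: simpler).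
-- Both versions are generators in Python; here each port returns the full yielded sequence as a list.

-- ===== PORT A =====
-- A's iterators are modelled as their remaining suffixes; check[i] is the Int paired with entry i
-- (check dict keyed by consecutive indices 0..len-1 = per-entry field, in index order).

-- the try-block 'for i in range(k, len(list1)): if check[i]==0: yield next(list1[i])' on the suffix
-- list1[k:] : returns (values yielded, updated suffix, relative index of StopIteration if raised).
def innerA : List (List Int × Int) → List Int × List (List Int × Int) × Option Nat
  | [] => ([], [], none)
  | (xs, c) :: rest =>
    if c = 0 then
      match xs with
      | [] => ([], ([], 1) :: rest, some 0)          -- next raises StopIteration; except sets check[i] = 1, k = i+1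
      | x :: xt =>
        let r := innerA rest
        (x :: r.1, (xt, 0) :: r.2.1, r.2.2.map (· + 1))
    else
      let r := innerA rest
      (r.1, (xs, c) :: r.2.1, r.2.2.map (· + 1))

-- loop measure: remaining elements plus one per still-unflagged entry
def measA (l : List (List Int × Int)) : Nat :=
  (l.map (fun p => p.1.length + (if p.2 = 0 then 1 else 0))).sum

theorem measA_append (a b : List (List Int × Int)) : measA (a ++ b) = measA a + measA b := by
  simp [measA]

-- facts innerA needs for the while-loop termination
theorem measA_cons (xs : List Int) (c : Int) (tl : List (List Int × Int)) :
    measA ((xs, c) :: tl) = xs.length + (if c = 0 then 1 else 0) + measA tl := by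
  simp [measA]

theorem innerA_measure (l : List (List Int × Int)) :
    (∀ o s rel, innerA l = (o, s, some rel) → measA s < measA l) ∧
    (∀ o s, innerA l = (o, s, none) → measA s + o.length = measA l ∧
      (o = [] → s = l ∧ ∀ p ∈ l, p.2 ≠ 0)) := by
  induction l with
  | nil =>
    refine ⟨?_, ?_⟩
    · intro o s rel h; simp [innerA] at h
    · intro o s h
      simp [innerA] at h
      obtain ⟨ho, hs⟩ := h
      subst ho; subst hs
      simp
  | cons hd tl ih =>
    obtain ⟨xs, c⟩ := hd
    rcases hr : innerA tl with ⟨o', s', f'⟩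
    refine ⟨?_, ?_⟩
    · intro o s rel h
      by_cases hc : c = 0
      · cases xs with
        | nil =>
          simp [innerA, hc] at h
          obtain ⟨-, hs, -⟩ := h
          subst hs
          simp [measA_cons, hc]
        | cons x xt =>
          cases f' with
          | none => simp [innerA, hc, hr] at h
          | some r' =>
            simp [innerA, hc, hr] at h
            obtain ⟨-, hs, -⟩ := h
            have hm := ih.1 o' s' r' (by rw [hr])
            subst hs
            simp [measA_cons, hc]
            omega
      · cases f' with
        | none => simp [innerA, hc, hr] at h
        | some r' =>
          simp [innerA, hc, hr] at h
          obtain ⟨-, hs, -⟩ := h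
          have hm := ih.1 o' s' r' (by rw [hr])
          subst hs
          simp [measA_cons, hc]
          omega
    · intro o s h
      by_cases hc : c = 0
      · cases xs with
        | nil => simp [innerA, hc] at h
        | cons x xt =>
          cases f' with
          | some r' => simp [innerA, hc, hr] at h
          | none =>
            simp [innerA, hc, hr] at h
            obtain ⟨ho, hs⟩ := h
            have hm := ih.2 o' s' (by rw [hr])
            subst ho; subst hs
            constructor
            · simp [measA_cons, hc]; omega
            · intro hoe; simp at hoe
      · cases f' with
        | some r' => simp [innerA, hc, hr] at h
        | none =>
          simp [innerA, hc, hr] at h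
          obtain ⟨ho, hs⟩ := h
          have hm := ih.2 o' s' (by rw [hr])
          subst ho; subst hs
          constructor
          · simp [measA_cons, hc]; omega
          · intro hoe
            obtain ⟨hs', hall⟩ := hm.2 hoe
            subst hs'
            refine ⟨rfl, ?_⟩
            intro p hp
            rw [List.mem_cons] at hp
            rcases hp with hp | hp
            · subst hp; exact hc
            · exact hall p hp

-- the while loop: one iteration = one try block starting at cursor k
def outerA (st : List (List Int × Int)) (k : Nat) : List Int :=
  match h : innerA (st.drop k) with
  | (o, s, some rel) =>
    -- except StopIteration: k = i + 1; continue
    o ++ outerA (st.take k ++ s) (k + rel + 1)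
  | (o, s, none) =>
    -- successful pass: k = 0, compute flag over all of check
    if hfl : (st.take k ++ s).all (fun p => p.2 != 0) then o
    else o ++ outerA (st.take k ++ s) 0
termination_by (measA st, k)
decreasing_by
  · have hm := (innerA_measure (st.drop k)).1 o s rel h
    have : measA st = measA (st.take k) + measA (st.drop k) := by
      rw [← measA_append, List.take_append_drop]
    apply Prod.Lex.left
    rw [measA_append]; omega
  · have hm := (innerA_measure (st.drop k)).2 o s h
    by_cases ho : o = []
    · obtain ⟨hs, hall⟩ := hm.2 ho
      subst hs
      rw [List.take_append_drop]
      have hk : 0 < k := by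
        rcases Nat.eq_zero_or_pos k with hk0 | hk0
        · exfalso
          apply hfl
          subst hk0
          simp only [List.take_zero, List.nil_append, List.drop_zero] at hall ⊢
          rw [List.all_eq_true]
          intro p hp
          simpa using hall p hp
        · exact hk0
      exact Prod.Lex.right _ hk
    · apply Prod.Lex.left
      have hol : o.length ≠ 0 := by simpa using ho
      have hsplit : measA st = measA (st.take k) + measA (st.drop k) := by
        rw [← measA_append, List.take_append_drop]
      rw [measA_append]; omega

def chain_loop (args : List (List Int)) : List Int :=
  outerA ((args.filter (fun xs => !xs.isEmpty)).map (fun xs => (xs, 0))) 0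

-- ===== PORT B =====
-- one pass over the live iterators: yielded values and the survivors (advanced, non-exhausted)
def passB : List (List Int) → List Int × List (List Int)
  | [] => ([], [])
  | xs :: rest =>
    let r := passB rest
    match xs with
    | [] => r                       -- StopIteration: drop this iterator
    | x :: xt => (x :: r.1, xt :: r.2)

def measB (live : List (List Int)) : Nat := (live.map (fun xs => xs.length + 1)).sum

theorem passB_measure (live : List (List Int)) (h : live ≠ []) :
    measB (passB live).2 < measB live := by
  induction live with
  | nil => exact absurd rfl h
  | cons hd tl ih =>
    cases hd with
    | nil =>
      cases tl with
      | nil => simp [passB, measB]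
      | cons a b =>
        have := ih (by simp)
        simp [passB, measB] at this ⊢
        omega
    | cons x xt =>
      cases tl with
      | nil => simp [passB, measB]
      | cons a b =>
        have := ih (by simp)
        simp [passB, measB] at this ⊢
        omega

def loopB (live : List (List Int)) : List Int :=
  if h : live = [] then []
  else
    let r := passB live
    r.1 ++ loopB r.2
termination_by measB live
decreasing_by exact passB_measure live h

def chain_loop_alt (args : List (List Int)) : List Int :=
  loopB (args.filter (fun xs => !xs.isEmpty))

-- ===== PRECONDITION & SPEC =====
def Spec_chain_loop (args : List (List Int)) (out : List Int) : Prop := out = chain_loop_alt args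
instance (args : List (List Int)) (out : List Int) : Decidable (Spec_chain_loop args out) := by unfold Spec_chain_loop; infer_instance

-- ===== CLAIM (what is proved, stated in full; the proofs are below) =====
def Claim_equal_chain_loop : Prop := ∀ (args : List (List Int)), Dom_chain_loop args → Spec_chain_loop args (chain_loop args)

-- ===== LEMMAS AND PROOFS =====

-- the still-live iterators of an A-state: remaining suffixes of the unflagged entries
def liveOf (st : List (List Int × Int)) : List (List Int) :=
  (st.filter (fun p => p.2 == 0)).map Prod.fst

theorem liveOf_nil : liveOf [] = [] := rfl

theorem liveOf_append (a b : List (List Int × Int)) : liveOf (a ++ b) = liveOf a ++ liveOf b := by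
  simp [liveOf]

theorem liveOf_map (l : List (List Int)) : liveOf (l.map (fun xs => (xs, 0))) = l := by
  simp [liveOf, List.filter_map]
  induction l with
  | nil => simp
  | cons h t ih => simp [List.filter, ih]

theorem allflag_iff (l : List (List Int × Int)) :
    (l.all (fun p => p.2 != 0) = true) ↔ liveOf l = [] := by
  induction l with
  | nil => simp [liveOf]
  | cons hd tl ih =>
    by_cases hc : hd.2 = 0
    · simp [liveOf, hc]
    · simp [liveOf, hc] at ih ⊢

theorem innerA_none_spec (l : List (List Int × Int)) (o : List Int) (s : List (List Int × Int))
    (h : innerA l = (o, s, none)) : passB (liveOf l) = (o, liveOf s) := by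
  induction l generalizing o s with
  | nil =>
    simp [innerA] at h
    simp [h.1, h.2, liveOf, passB]
  | cons hd tl ih =>
    obtain ⟨xs, c⟩ := hd
    rcases hr : innerA tl with ⟨o', s', f'⟩
    by_cases hc : c = 0
    · cases xs with
      | nil => simp [innerA, hc] at h
      | cons x xt =>
        cases f' with
        | some r' => simp [innerA, hc, hr] at h
        | none =>
          simp [innerA, hc, hr] at h
          obtain ⟨ho, hs⟩ := h
          have hm := ih o' s' (by rw [hr])
          subst ho; subst hs
          simp [liveOf, hc, passB]
          simp [liveOf] at hm
          simp [hm]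
    · cases f' with
      | some r' => simp [innerA, hc, hr] at h
      | none =>
        simp [innerA, hc, hr] at h
        obtain ⟨ho, hs⟩ := h
        have hm := ih o' s' (by rw [hr])
        subst ho; subst hs
        simp [liveOf, hc]
        simp [liveOf] at hm
        exact hm

theorem innerA_some_spec (l : List (List Int × Int)) (o : List Int) (s : List (List Int × Int)) (rel : Nat)
    (h : innerA l = (o, s, some rel)) :
    s.length = l.length ∧ s.drop (rel + 1) = l.drop (rel + 1) ∧
    passB (liveOf l) =
      (o ++ (passB (liveOf (l.drop (rel + 1)))).1,
       liveOf (s.take (rel + 1)) ++ (passB (liveOf (l.drop (rel + 1)))).2) := by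
  induction l generalizing o s rel with
  | nil => simp [innerA] at h
  | cons hd tl ih =>
    obtain ⟨xs, c⟩ := hd
    rcases hr : innerA tl with ⟨o', s', f'⟩
    by_cases hc : c = 0
    · cases xs with
      | nil =>
        simp [innerA, hc] at h
        obtain ⟨ho, hs, hrel⟩ := h
        subst ho; subst hs; subst hrel
        simp [liveOf, hc, passB]
      | cons x xt =>
        cases f' with
        | none => simp [innerA, hc, hr] at h
        | some r' =>
          simp [innerA, hc, hr] at h
          obtain ⟨ho, hs, hrel⟩ := h
          have hm := ih o' s' r' (by rw [hr])
          subst ho; subst hs; subst hrel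
          refine ⟨by simp [hm.1], by simp [hm.2.1], ?_⟩
          simp [liveOf, hc, passB]
          simp [liveOf] at hm
          simp [hm.2.2]
    · cases f' with
      | none => simp [innerA, hc, hr] at h
      | some r' =>
        simp [innerA, hc, hr] at h
        obtain ⟨ho, hs, hrel⟩ := h
        have hm := ih o' s' r' (by rw [hr])
        subst ho; subst hs; subst hrel
        refine ⟨by simp [hm.1], by simp [hm.2.1], ?_⟩
        simp [liveOf, hc]
        simp [liveOf] at hm
        exact hm.2.2

theorem loopB_nil : loopB [] = [] := by
  rw [loopB]
  simp

theorem loopB_step (live : List (List Int)) :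
    (passB live).1 ++ loopB (passB live).2 = loopB live := by
  by_cases h : live = []
  · subst h; simp [passB, loopB]
  · conv_rhs => rw [loopB]
    simp [h]

-- the super-pass invariant: from cursor k, A emits the current pass over the suffix's live
-- iterators and then behaves as B's loop on all survivors
theorem outerA_eq (st : List (List Int × Int)) (k : Nat) :
    outerA st k =
      (passB (liveOf (st.drop k))).1 ++
        loopB (liveOf (st.take k) ++ (passB (liveOf (st.drop k))).2) := by
  fun_induction outerA st k with
  | case1 st k o s rel h ih =>
    have hsp := innerA_some_spec _ o s rel h
    have hkl : k < st.length := by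
      by_contra hk
      rw [List.drop_eq_nil_of_le (by omega)] at h
      simp [innerA] at h
    have hlen : (List.take k st).length = k := by simp; omega
    have e1 : k + rel + 1 = (List.take k st).length + (rel + 1) := by rw [hlen]; omega
    have hdd : List.drop (rel + 1) (List.drop k st) = List.drop (k + rel + 1) st := by
      rw [List.drop_drop]; congr 1
    have hsub : k + rel + 1 - (List.take k st).length = rel + 1 := by rw [hlen]; omega
    have hdrop : List.drop (k + rel + 1) (List.take k st ++ s) = List.drop (k + rel + 1) st := by
      rw [List.drop_append, List.drop_eq_nil_of_le (by rw [hlen]; omega), List.nil_append,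
        hsub, hsp.2.1, hdd]
    have htake : List.take (k + rel + 1) (List.take k st ++ s) =
        List.take k st ++ List.take (rel + 1) s := by
      rw [List.take_append, List.take_of_length_le (by rw [hlen]; omega), hsub]
    rw [hdrop, htake, liveOf_append] at ih
    rw [ih]
    rw [hdd] at hsp
    rw [hsp.2.2]
    simp [List.append_assoc]
  | case2 st k o s h hfl =>
    have hsp := innerA_none_spec _ o s h
    have hnil : liveOf (List.take k st ++ s) = [] := (allflag_iff _).mp hfl
    rw [liveOf_append] at hnil
    rw [List.append_eq_nil_iff] at hnil
    rw [hsp, hnil.1, hnil.2]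
    simp [loopB_nil]
  | case3 st k o s h hfl ih =>
    have hsp := innerA_none_spec _ o s h
    simp only [List.drop_zero, List.take_zero, liveOf_nil, List.nil_append] at ih
    rw [loopB_step] at ih
    rw [ih, liveOf_append, hsp]

theorem chain_loop_eq (args : List (List Int)) : chain_loop args = chain_loop_alt args := by
  have h := outerA_eq ((args.filter (fun xs => !xs.isEmpty)).map (fun xs => (xs, 0))) 0
  simp only [List.drop_zero, List.take_zero, liveOf_nil, List.nil_append, liveOf_map] at h
  rw [chain_loop, chain_loop_alt, h, loopB_step]

-- ===== VERDICT (by name: the statement is the Claim_ definition above) =====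
theorem chain_loop_spec : Claim_equal_chain_loop := by
  intro args _
  unfold Spec_chain_loop
  exact chain_loop_eq args
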